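-- pv_equiv track=rewrite | github.com/ob-julian/adventofcode-2024 | 20th/solver.py | posible_n_turns
-- ===== SOURCE A (Python) =====
-- DIRECTIONS = [(0, -1), (-1, 0), (0, 1), (1, 0)]
--
-- def posible_n_turns(maze, x, y, num_turns):
--     result = set()
--
--     def dfs(current_x, current_y, depth):
--         if depth < num_turns:
--             if 0 <= current_y < len(maze) and 0 <= current_x < len(maze[current_y]) and maze[current_y][current_x] != '#':
--                 result.add((current_x, current_y))
--         if depth == 0:
--             return
--         for (dx, dy) in DIRECTIONS:
--             new_x, new_y = current_x + dx, current_y + dy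
--             dfs(new_x, new_y, depth - 1)
--
--     dfs(x, y, num_turns)
--     return result
-- ===== SOURCE B (Python) =====
-- DIRECTIONS = [(0, -1), (-1, 0), (0, 1), (1, 0)]
--
-- def posible_n_turns(maze, x, y, num_turns):
--     result = set()
--     stack = [(x, y, num_turns)]
--     while stack:
--         cx, cy, depth = stack.pop()
--         if depth < num_turns and 0 <= cy < len(maze) and 0 <= cx < len(maze[cy]) and maze[cy][cx] != '#':
--             result.add((cx, cy))
--         if depth == 0:
--             continue
--         for dx, dy in reversed(DIRECTIONS):
--             stack.append((cx + dx, cy + dy, depth - 1))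
--     return result
-- ===== Notes on version B (the rewrite author's own statement) =====
-- stated objective: alternative
-- what changed: Replaces A's nested recursive dfs closure with an iterative explicit-stack traversal (push-reversed preorder loop over a worklist), removing recursion entirely; same exponential visit count.
import Mathlib
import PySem

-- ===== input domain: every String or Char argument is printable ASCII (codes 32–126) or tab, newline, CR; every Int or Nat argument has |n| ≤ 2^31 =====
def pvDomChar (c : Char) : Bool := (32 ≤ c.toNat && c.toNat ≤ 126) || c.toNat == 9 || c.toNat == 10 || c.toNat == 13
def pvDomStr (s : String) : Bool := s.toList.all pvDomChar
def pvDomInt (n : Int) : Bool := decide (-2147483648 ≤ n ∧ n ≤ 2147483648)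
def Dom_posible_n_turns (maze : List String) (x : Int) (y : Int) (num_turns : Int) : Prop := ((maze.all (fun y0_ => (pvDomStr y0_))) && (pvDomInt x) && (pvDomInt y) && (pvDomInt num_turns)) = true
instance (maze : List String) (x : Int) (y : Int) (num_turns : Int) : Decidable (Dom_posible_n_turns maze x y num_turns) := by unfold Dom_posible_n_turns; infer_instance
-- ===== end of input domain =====

-- B replaces A's recursive dfs closure with an iterative explicit-stack preorder traversal
-- (alternative decomposition; same visited cells in the same first-insertion order).

-- ===== PORT A =====
def pvDirections : List (Int × Int) := [(0, -1), (-1, 0), (0, 1), (1, 0)]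

-- the combined bounds-and-wall test `0 <= cy < len(maze) and 0 <= cx < len(maze[cy]) and maze[cy][cx] != '#'`
-- (indices only read after the 0 ≤ _ < len bounds hold, so getD is exact here)
def pvValid (maze : List String) (cx cy : Int) : Bool :=
  decide (0 ≤ cy) && decide (cy < (maze.length : Int)) &&
  (let row := (maze.getD cy.toNat "").toList
   decide (0 ≤ cx) && decide (cx < (row.length : Int)) && decide (row.getD cx.toNat ' ' ≠ '#'))

-- the nested `def dfs(current_x, current_y, depth)`; Python's depth counts num_turns, …, 1, 0,
-- so it is a Nat here (A only returns for num_turns ≥ 0 — see Pre_ below)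
def pvDfsA (maze : List String) (nt : Int) : Int → Int → Nat → PySem.Set (Int × Int) → PySem.Set (Int × Int)
  | cx, cy, depth, res =>
    let res1 := if (depth : Int) < nt && pvValid maze cx cy then PySem.Set.add res (cx, cy) else res
    match depth with
    | 0 => res1
    | d + 1 => pvDirections.foldl (fun r p => pvDfsA maze nt (cx + p.1) (cy + p.2) d r) res1

def posible_n_turns (maze : List String) (x : Int) (y : Int) (num_turns : Int) : List (Int × Int) :=
  pvDfsA maze num_turns x y num_turns.toNat PySem.Set.empty

-- ===== PORT B =====
-- termination measure for the worklist loop: size of the full 4-ary tree of the given depth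
def pvTreeSize : Nat → Nat
  | 0 => 1
  | d + 1 => 1 + 4 * pvTreeSize d

theorem pvTreeSize_pos (d : Nat) : 1 ≤ pvTreeSize d := by
  cases d <;> simp [pvTreeSize]

-- the `while stack:` loop; head of the list = top of the Python stack (list.pop() end);
-- `for dx, dy in reversed(DIRECTIONS): stack.append(…)` = fold over pvDirections.reverse consing on top
def pvLoopB (maze : List String) (nt : Int) : List (Int × Int × Nat) → PySem.Set (Int × Int) → PySem.Set (Int × Int)
  | [], res => res
  | (cx, cy, depth) :: stack, res =>
    let res1 := if (depth : Int) < nt && pvValid maze cx cy then PySem.Set.add res (cx, cy) else res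
    match depth with
    | 0 => pvLoopB maze nt stack res1
    | d + 1 =>
      pvLoopB maze nt
        (pvDirections.reverse.foldl (fun st p => (cx + p.1, cy + p.2, d) :: st) stack) res1
termination_by stack _ => (stack.map (fun t => pvTreeSize t.2.2)).sum
decreasing_by
  · simp [pvTreeSize]
  · simp [pvDirections, pvTreeSize]
    have := pvTreeSize_pos d
    omega

def posible_n_turns_alt (maze : List String) (x : Int) (y : Int) (num_turns : Int) : List (Int × Int) :=
  pvLoopB maze num_turns [(x, y, num_turns.toNat)] PySem.Set.empty

-- ===== PRECONDITION & SPEC =====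
-- Python A only returns for num_turns ≥ 0: for negative num_turns its dfs recurses without
-- a base case and raises RecursionError (B's while-loop likewise never terminates there).
def Pre_posible_n_turns (maze : List String) (x : Int) (y : Int) (num_turns : Int) : Prop :=
  0 ≤ num_turns
instance (maze : List String) (x : Int) (y : Int) (num_turns : Int) : Decidable (Pre_posible_n_turns maze x y num_turns) := by unfold Pre_posible_n_turns; infer_instance

def pvWitness_posible_n_turns : List String × Int × Int × Int := (["...", ".#.", "..."], 1, 1, 2)

def Spec_posible_n_turns (maze : List String) (x : Int) (y : Int) (num_turns : Int) (out : List (Int × Int)) : Prop := out = posible_n_turns_alt maze x y num_turns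
instance (maze : List String) (x : Int) (y : Int) (num_turns : Int) (out : List (Int × Int)) : Decidable (Spec_posible_n_turns maze x y num_turns out) := by unfold Spec_posible_n_turns; infer_instance

-- ===== CLAIM (what is proved, stated in full; the proofs are below) =====
def Claim_equal_posible_n_turns : Prop := ∀ (maze : List String) (x : Int) (y : Int) (num_turns : Int), Dom_posible_n_turns maze x y num_turns → Pre_posible_n_turns maze x y num_turns → Spec_posible_n_turns maze x y num_turns (posible_n_turns maze x y num_turns)

-- ===== LEMMAS AND PROOFS =====
-- popping one frame off the worklist does exactly what one recursive dfs call does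
theorem pvLoopB_cons (maze : List String) (nt : Int) (depth : Nat) :
    ∀ (cx cy : Int) (stack : List (Int × Int × Nat)) (res : PySem.Set (Int × Int)),
    pvLoopB maze nt ((cx, cy, depth) :: stack) res
      = pvLoopB maze nt stack (pvDfsA maze nt cx cy depth res) := by
  induction depth with
  | zero =>
    intro cx cy stack res
    rw [pvLoopB, pvDfsA]
  | succ d ih =>
    intro cx cy stack res
    rw [pvLoopB, pvDfsA]
    simp only [pvDirections, List.reverse_cons, List.reverse_nil, List.nil_append,
      List.cons_append, List.foldl_cons, List.foldl_nil]
    rw [ih, ih, ih, ih]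

theorem pvLoopB_start (maze : List String) (nt : Int) (cx cy : Int) (depth : Nat)
    (res : PySem.Set (Int × Int)) :
    pvLoopB maze nt [(cx, cy, depth)] res = pvDfsA maze nt cx cy depth res := by
  rw [pvLoopB_cons, pvLoopB]

-- ===== VERDICT (by name: the statement is the Claim_ definition above) =====
theorem posible_n_turns_spec : Claim_equal_posible_n_turns := by
  intro maze x y num_turns _ _
  unfold Spec_posible_n_turns posible_n_turns posible_n_turns_alt
  rw [pvLoopB_start]
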